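-- pv_equiv track=rewrite | github.com/pypi-data/pypi-mirror-392 | packages/mapFolding/mapfolding-0.17.1.tar.gz/mapfolding-0.17.1/mapFolding/reference/meandersDumpingGround/matrixMeandersNumPyV1finalForm.py | A000682getCurveLocations
-- ===== SOURCE A (Python) =====
-- def A000682getCurveLocations(n: int) -> dict[int, int]:
-- 	curveLocationsMAXIMUM: int = 1 << (2 * n + 4)
-- 	curveStart: int = 5 - (n & 0b1) * 4
-- 	listCurveLocations: list[int] = [(curveStart << 1) | curveStart]
-- 	while listCurveLocations[-1] < curveLocationsMAXIMUM:
-- 		curveStart = (curveStart << 4) | 0b101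
-- 		listCurveLocations.append((curveStart << 1) | curveStart)
-- 	return dict.fromkeys(listCurveLocations, 1)
-- ===== SOURCE B (Python) =====
-- def A000682getCurveLocations(n: int) -> dict[int, int]:
--     parity = n & 1
--     count = (n + parity) // 2 + 2
--     e = 4 - 2 * parity
--     return {(1 << (e + 4 * i)) - 1: 1 for i in range(count)}
-- ===== Notes on version B (the rewrite author's own statement) =====
-- stated objective: simpler
-- what changed: B replaces A's while-loop that maintains the alternating-bit accumulator curveStart and derives each key as (curveStart<<1)|curveStart with a closed-form key count ((n + (n&1))//2 + 2) and a single range comprehension emitting the keys 2^e - 1 directly from an exponent arithmetic progression.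
-- outside the precondition, e.g. on A000682getCurveLocations(-3): A raises ValueError, B returns {3: 1}
import Mathlib
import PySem

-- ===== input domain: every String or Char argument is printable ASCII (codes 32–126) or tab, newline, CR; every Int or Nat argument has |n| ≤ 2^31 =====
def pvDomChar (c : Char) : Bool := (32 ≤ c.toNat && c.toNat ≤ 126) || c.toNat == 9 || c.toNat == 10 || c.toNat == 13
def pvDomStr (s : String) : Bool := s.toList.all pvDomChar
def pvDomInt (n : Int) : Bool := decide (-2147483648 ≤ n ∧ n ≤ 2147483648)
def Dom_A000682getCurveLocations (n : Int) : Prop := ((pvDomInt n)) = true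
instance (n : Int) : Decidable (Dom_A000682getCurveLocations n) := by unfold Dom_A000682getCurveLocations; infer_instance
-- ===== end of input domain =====

-- B replaces A's while-loop over the alternating-bit accumulator by a closed-form key count
-- and a single range comprehension of 2^e - 1 keys (objective: simpler; return value only).

-- ===== PORT A =====
-- pvD m is the m-one alternating-bit constant 0b01…0101 (1, 5, 21, …): exactly the values
-- A's curveStart variable takes; the loop port carries 'curveStart = pvD (m+1)' as the
-- invariant that makes the while loop provably terminating.
def pvD : Nat → Nat
  | 0 => 0
  | m + 1 => 4 * pvD m + 1

theorem pvD_or_self (m : Nat) : (pvD m <<< 1) ||| pvD m = 3 * pvD m := by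
  induction m with
  | zero => decide
  | succ m ih =>
    have hx : 2 * pvD m ||| pvD m = 3 * pvD m := by
      rw [show 2 * pvD m = pvD m <<< 1 by rw [Nat.shiftLeft_eq]; ring, ih]
    show ((4 * pvD m + 1) <<< 1) ||| (4 * pvD m + 1) = 3 * (4 * pvD m + 1)
    calc ((4 * pvD m + 1) <<< 1) ||| (4 * pvD m + 1)
        = ((2 * pvD m) <<< 2 + 2) ||| ((pvD m) <<< 2 + 1) := by
          rw [Nat.shiftLeft_eq, Nat.shiftLeft_eq, Nat.shiftLeft_eq]; congr 1 <;> ring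
      _ = (((2 * pvD m) <<< 2) ||| 2) ||| (((pvD m) <<< 2) ||| 1) := by
          rw [Nat.shiftLeft_add_eq_or_of_lt (by norm_num), Nat.shiftLeft_add_eq_or_of_lt (by norm_num)]
      _ = (((2 * pvD m) <<< 2) ||| ((pvD m) <<< 2)) ||| (2 ||| 1) := by ac_rfl
      _ = ((2 * pvD m ||| pvD m) <<< 2) ||| 3 := by
          rw [show (2:Nat) ||| 1 = 3 from rfl, ← Nat.shiftLeft_or_distrib]
      _ = (3 * pvD m) <<< 2 + 3 := by
          rw [hx, ← Nat.shiftLeft_add_eq_or_of_lt (by norm_num : (3:Nat) < 2 ^ 2)]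
      _ = 3 * (4 * pvD m + 1) := by rw [Nat.shiftLeft_eq]; ring

theorem pvD_step (m : Nat) : (pvD m <<< 4) ||| 5 = pvD (m + 2) := by
  rw [← Nat.shiftLeft_add_eq_or_of_lt (by norm_num : (5:Nat) < 2 ^ 4)]
  simp [pvD, Nat.shiftLeft_eq]; ring

-- Int-side versions used by the loop port (for its termination argument).
theorem pvD_bor_self (m : Nat) :
    PySem.Int.bor (((pvD m : Nat) : Int) <<< (1:Nat)) ((pvD m : Nat) : Int) = 3 * ((pvD m : Nat) : Int) := by
  have : (((pvD m : Nat) : Int) <<< (1:Nat)) = (((pvD m <<< 1 : Nat) : Nat) : Int) := by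
    rw [Int.shiftLeft_eq, Nat.shiftLeft_eq]; push_cast; ring
  rw [this, PySem.Int.bor_natCast, pvD_or_self]; push_cast; ring

theorem pvD_bor_step (m : Nat) :
    PySem.Int.bor (((pvD m : Nat) : Int) <<< (4:Nat)) 5 = ((pvD (m + 2) : Nat) : Int) := by
  have : (((pvD m : Nat) : Int) <<< (4:Nat)) = (((pvD m <<< 4 : Nat) : Nat) : Int) := by
    rw [Int.shiftLeft_eq, Nat.shiftLeft_eq]; push_cast; ring
  have h5 : (5 : Int) = ((5 : Nat) : Int) := by norm_num
  rw [this, h5, PySem.Int.bor_natCast, pvD_step]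

theorem pvD_lt_step (m : Nat) : pvD m < pvD (m + 2) := by
  simp [pvD]; omega

-- the while loop of A; listCurveLocations[-1] is always (curveStart << 1) | curveStart
-- for the current curveStart, which the condition reads directly
def A000682loop (maximum : Int) (c : Int) (acc : List Int)
    (hc : ∃ m, c = ((pvD (m + 1) : Nat) : Int)) : List Int :=
  if h : PySem.Int.bor (c <<< (1:Nat)) c < maximum then
    A000682loop maximum (PySem.Int.bor (c <<< (4:Nat)) 5)
      (acc ++ [PySem.Int.bor ((PySem.Int.bor (c <<< (4:Nat)) 5) <<< (1:Nat)) (PySem.Int.bor (c <<< (4:Nat)) 5)])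
      (by obtain ⟨m, rfl⟩ := hc; exact ⟨m + 2, by rw [pvD_bor_step]⟩)
  else acc
termination_by (maximum - PySem.Int.bor (c <<< (1:Nat)) c).toNat
decreasing_by
  obtain ⟨m, rfl⟩ := hc
  rw [pvD_bor_step, pvD_bor_self, pvD_bor_self] at *
  have h1 : ((pvD (m + 1) : Nat) : Int) < ((pvD (m + 1 + 2) : Nat) : Int) :=
    by exact_mod_cast pvD_lt_step (m + 1)
  omega

theorem pvStart_ok (n : Int) : ∃ m, 5 - PySem.Int.band n 1 * 4 = ((pvD (m + 1) : Nat) : Int) := by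
  rw [PySem.Int.band_one]
  rcases PySem.Int.mod_two_eq n with h | h
  · exact ⟨1, by rw [h]; decide⟩
  · exact ⟨0, by rw [h]; decide⟩

-- Python computes 1 << (2*n + 4) and raises ValueError when 2*n + 4 < 0; Pre_ excludes those n.
def A000682getCurveLocations (n : Int) : List (Int × Int) :=
  let maximum : Int := (1 : Int) <<< (2 * n + 4).toNat
  let curveStart : Int := 5 - PySem.Int.band n 1 * 4
  (A000682loop maximum curveStart
      [PySem.Int.bor (curveStart <<< (1:Nat)) curveStart] (pvStart_ok n)).map (fun k => (k, 1))

-- ===== PORT B =====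
-- exponent e + 4*i is nonnegative for every i produced by range(count), so .toNat is exact
def A000682getCurveLocations_alt (n : Int) : List (Int × Int) :=
  let parity : Int := PySem.Int.band n 1
  let count : Int := PySem.Int.floordiv (n + parity) 2 + 2
  let e : Int := 4 - 2 * parity
  (PySem.List.pyRange 0 count 1).map (fun i => (((1 : Int) <<< (e + 4 * i).toNat) - 1, 1))

-- ===== PRECONDITION & SPEC =====
-- Pre_ excludes exactly n ≤ -3, where Python's '1 << (2*n + 4)' raises ValueError (negative shift count).
def Pre_A000682getCurveLocations (n : Int) : Prop := -2 ≤ n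
instance (n : Int) : Decidable (Pre_A000682getCurveLocations n) := by unfold Pre_A000682getCurveLocations; infer_instance
def pvWitness_A000682getCurveLocations : Int := 1

def Spec_A000682getCurveLocations (n : Int) (out : List (Int × Int)) : Prop := out = A000682getCurveLocations_alt n
instance (n : Int) (out : List (Int × Int)) : Decidable (Spec_A000682getCurveLocations n out) := by unfold Spec_A000682getCurveLocations; infer_instance

-- ===== CLAIM (what is proved, stated in full; the proofs are below) =====
def Claim_equal_A000682getCurveLocations : Prop := ∀ (n : Int), Dom_A000682getCurveLocations n → Pre_A000682getCurveLocations n → Spec_A000682getCurveLocations n (A000682getCurveLocations n)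

-- ===== LEMMAS AND PROOFS =====


theorem pvD_closed (m : Nat) : 3 * pvD m + 1 = 2 ^ (2 * m) := by
  induction m with
  | zero => decide
  | succ m ih =>
    have : 2 ^ (2 * (m + 1)) = 2 ^ (2 * m) * 4 := by rw [show 2*(m+1) = 2*m+2 by ring, pow_add]; norm_num
    rw [this, ← ih]; simp [pvD]; ring

theorem loop_congr (maximum : Int) {c1 c2 : Int} {acc1 acc2 : List Int}
    (h1 : ∃ m, c1 = ((pvD (m + 1) : Nat) : Int)) (h2 : ∃ m, c2 = ((pvD (m + 1) : Nat) : Int))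
    (hc : c1 = c2) (ha : acc1 = acc2) :
    A000682loop maximum c1 acc1 h1 = A000682loop maximum c2 acc2 h2 := by
  subst hc; subst ha; rfl

theorem loop_spec (K : Nat) : ∀ (m : Nat) (maximum : Int) (acc : List Int)
    (h : ∃ m', ((pvD (m + 1) : Nat) : Int) = ((pvD (m' + 1) : Nat) : Int)),
    (∀ i, i < K → 3 * ((pvD (m + 1 + 2 * i) : Nat) : Int) < maximum) →
    (maximum ≤ 3 * ((pvD (m + 1 + 2 * K) : Nat) : Int)) →
    A000682loop maximum ((pvD (m + 1) : Nat) : Int) acc h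
      = acc ++ (List.range K).map (fun i => 3 * ((pvD (m + 1 + 2 * (i + 1)) : Nat) : Int)) := by
  induction K with
  | zero =>
    intro m maximum acc h _ hge
    rw [A000682loop]
    rw [dif_neg (by rw [pvD_bor_self]; exact not_lt.mpr (by simpa using hge))]
    simp
  | succ K ih =>
    intro m maximum acc h hlt hge
    have hcond : PySem.Int.bor (((pvD (m + 1) : Nat) : Int) <<< (1:Nat)) ((pvD (m + 1) : Nat) : Int) < maximum := by
      rw [pvD_bor_self]; simpa using hlt 0 (Nat.succ_pos K)
    rw [A000682loop, dif_pos hcond]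
    refine Eq.trans (loop_congr maximum ?_ ⟨m + 2, rfl⟩ (pvD_bor_step (m + 1))
      (show _ = acc ++ [3 * ((pvD (m + 2 + 1) : Nat) : Int)] by
        rw [pvD_bor_step (m + 1), pvD_bor_self])) ?_
    · exact ⟨m + 2, by rw [pvD_bor_step]⟩
    rw [ih (m + 2) maximum (acc ++ [3 * ((pvD (m + 2 + 1) : Nat) : Int)]) ⟨m + 2, rfl⟩
      (fun i hi => by
        have := hlt (i + 1) (by omega)
        rwa [show m + 1 + 2 * (i + 1) = m + 2 + 1 + 2 * i from by ring] at this)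
      (by rwa [show m + 1 + 2 * (K + 1) = m + 2 + 1 + 2 * K from by ring] at hge)]
    rw [List.append_assoc]
    congr 1
    rw [List.range_succ_eq_map, List.map_cons, List.map_map, List.singleton_append]
    congr 1
    refine List.map_congr_left (fun i _ => ?_)
    have e1 : m + 1 + 2 * (i + 1 + 1) = m + 2 + 1 + 2 * (i + 1) := by ring
    simp [Function.comp, Nat.succ_eq_add_one, e1]

theorem key_closed (j : Nat) : (1 : Int) <<< (2 * j) - 1 = 3 * ((pvD j : Nat) : Int) := by
  have h : ((3 * pvD j + 1 : Nat) : Int) = ((2 ^ (2 * j) : Nat) : Int) := by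
    exact_mod_cast congrArg (fun x => ((x : Nat) : Int)) (pvD_closed j)
  push_cast at h
  rw [Int.shiftLeft_eq, one_mul, ← h]; ring

theorem key_lt_iff (j M : Nat) : (3 * ((pvD j : Nat) : Int) < (1 : Int) <<< M) ↔ 2 * j ≤ M := by
  rw [Int.shiftLeft_eq, one_mul]
  rw [show ((2 : Int) ^ M) = ((2 ^ M : Nat) : Int) from by push_cast; ring]
  rw [show (3 : Int) * ((pvD j : Nat) : Int) = ((3 * pvD j : Nat) : Int) from by push_cast; ring]
  rw [Nat.cast_lt]
  have hc := pvD_closed j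
  constructor
  · intro h
    exact (Nat.pow_le_pow_iff_right Nat.one_lt_two).mp (by omega)
  · intro h
    have := Nat.pow_le_pow_right (by norm_num : 1 ≤ 2) h
    omega

theorem key_ge_iff (j M : Nat) : ((1 : Int) <<< M ≤ 3 * ((pvD j : Nat) : Int)) ↔ M < 2 * j := by
  rw [← not_lt, key_lt_iff]; omega

theorem A_canon (n : Int) (m K : Nat)
    (hc0 : 5 - PySem.Int.band n 1 * 4 = ((pvD (m + 1) : Nat) : Int))
    (hlt : ∀ i, i < K → 3 * ((pvD (m + 1 + 2 * i) : Nat) : Int) < (1 : Int) <<< (2 * n + 4).toNat)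
    (hge : (1 : Int) <<< (2 * n + 4).toNat ≤ 3 * ((pvD (m + 1 + 2 * K) : Nat) : Int)) :
    A000682getCurveLocations n
      = (List.range (K + 1)).map (fun i => ((3 * ((pvD (m + 1 + 2 * i) : Nat) : Int)), 1)) := by
  simp only [A000682getCurveLocations]
  refine Eq.trans (congrArg (List.map _) (loop_congr _ (pvStart_ok n) ⟨m, rfl⟩ hc0
    (by rw [hc0, pvD_bor_self]))) ?_
  rw [loop_spec K m _ _ ⟨m, rfl⟩ hlt hge]
  rw [List.range_succ_eq_map]
  simp only [List.map_cons, List.map_map, List.singleton_append]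
  congr 1

-- ===== VERDICT (by name: the statement is the Claim_ definition above) =====
theorem A000682getCurveLocations_spec : Claim_equal_A000682getCurveLocations := by
  intro n _ hpre
  unfold Spec_A000682getCurveLocations
  have hpre' : (-2 : Int) ≤ n := hpre
  rcases PySem.Int.mod_two_eq n with hm | hm
  · -- even n : curveStart = 5 = pvD 2, first exponent 4
    have hdvd : (2 : Int) ∣ n := (PySem.Int.mod_eq_zero_iff_dvd n 2).mp hm
    have hA := A_canon n 1 ((n + 2) / 2).toNat
      (by rw [PySem.Int.band_one, hm]; norm_num [pvD])
      (fun i hi => (key_lt_iff (1 + 1 + 2 * i) _).mpr (by omega))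
      ((key_ge_iff (1 + 1 + 2 * ((n + 2) / 2).toNat) _).mpr (by omega))
    rw [hA]
    simp only [A000682getCurveLocations_alt, PySem.Int.band_one, hm]
    rw [PySem.Int.floordiv_eq_ediv_of_pos (by norm_num)]
    rw [show (n + 0) / 2 + 2 = ((((n + 2) / 2).toNat + 1 : Nat) : Int) from by push_cast; omega]
    rw [PySem.List.pyRange_zero_natCast, List.map_map]
    refine List.map_congr_left (fun i _ => ?_)
    simp only [Function.comp]
    rw [show ((4 : Int) - 2 * 0 + 4 * (i : Int)).toNat = 2 * (1 + 1 + 2 * i) from by omega,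
      key_closed]
  · -- odd n : curveStart = 1 = pvD 1, first exponent 2
    have hodd : ¬ (2 : Int) ∣ n := by
      intro hdvd
      rw [(PySem.Int.mod_eq_zero_iff_dvd n 2).mpr hdvd] at hm; exact absurd hm (by norm_num)
    have hA := A_canon n 0 ((n + 3) / 2).toNat
      (by rw [PySem.Int.band_one, hm]; norm_num [pvD])
      (fun i hi => (key_lt_iff (0 + 1 + 2 * i) _).mpr (by omega))
      ((key_ge_iff (0 + 1 + 2 * ((n + 3) / 2).toNat) _).mpr (by omega))
    rw [hA]
    simp only [A000682getCurveLocations_alt, PySem.Int.band_one, hm]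
    rw [PySem.Int.floordiv_eq_ediv_of_pos (by norm_num)]
    rw [show (n + 1) / 2 + 2 = ((((n + 3) / 2).toNat + 1 : Nat) : Int) from by push_cast; omega]
    rw [PySem.List.pyRange_zero_natCast, List.map_map]
    refine List.map_congr_left (fun i _ => ?_)
    simp only [Function.comp]
    rw [show ((4 : Int) - 2 * 1 + 4 * (i : Int)).toNat = 2 * (0 + 1 + 2 * i) from by omega,
      key_closed]
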